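-- pv_equiv track=rewrite | github.com/zulfi011/beginner_python_projects | bingo_game/main.py | checkVertically
-- ===== SOURCE A (Python) =====
-- def checkVertically(card):
--     all_values = []
--     for i in range(len(card)):
--         new_val = []
--         for val in card.values():
--             new_val.append(val[i])
--         all_values.append(new_val)
--     for i in all_values:
--         if sum(i)==0:
--             return True
-- ===== SOURCE B (Python) =====
-- def checkVertically(card):
--     n = len(card)
--     col_sums = [0] * n
--     for row in card.values():
--         col_sums = [col_sums[i] + row[i] for i in range(n)]
--     for s in col_sums:
--         if s == 0:
--             return True
-- ===== Notes on version B (the rewrite author's own statement) =====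
-- stated objective: alternative
-- what changed: B keeps a running column-sum accumulator updated once per row instead of materializing the transposed grid of all column lists before summing.
import Mathlib
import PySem

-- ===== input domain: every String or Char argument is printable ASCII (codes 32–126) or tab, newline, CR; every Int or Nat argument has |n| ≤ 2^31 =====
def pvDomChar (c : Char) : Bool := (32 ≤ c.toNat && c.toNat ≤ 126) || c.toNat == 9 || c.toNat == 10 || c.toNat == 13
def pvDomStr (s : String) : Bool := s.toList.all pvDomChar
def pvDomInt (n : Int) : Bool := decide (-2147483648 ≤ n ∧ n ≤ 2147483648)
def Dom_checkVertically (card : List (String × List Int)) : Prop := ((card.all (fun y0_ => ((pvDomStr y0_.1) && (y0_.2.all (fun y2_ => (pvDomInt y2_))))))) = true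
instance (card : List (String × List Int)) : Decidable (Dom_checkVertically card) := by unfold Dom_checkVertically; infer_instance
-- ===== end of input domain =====

-- B keeps a running column-sum accumulator updated once per row instead of materializing the transposed grid (alternative decomposition).


-- ===== PORT A =====
-- inner loop: new_val = []; for val in card.values(): new_val.append(val[i])
-- (val[i] may raise IndexError → Option threading; none is reached only outside Pre_)
def pvBuildCol (vals : List (List Int)) (i : Int) : Option (List Int) :=
  vals.foldl (fun acc val => acc.bind (fun l => (PySem.List.pyGet? val i).map (fun x => l ++ [x]))) (some [])

-- outer loop: for i in range(len(card)): … ; all_values.append(new_val)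
def pvBuildAll (vals : List (List Int)) (n : Nat) : Option (List (List Int)) :=
  (PySem.List.pyRange 0 n 1).foldl (fun acc i => acc.bind (fun av => (pvBuildCol vals i).map (fun c => av ++ [c]))) (some [])

-- for i in all_values: if sum(i)==0: return True   (falls off the end → None)
def pvScanA : List (List Int) → Option Bool
  | [] => none
  | c :: rest => if c.sum = 0 then some true else pvScanA rest

def checkVertically (card : List (String × List Int)) : Option Bool :=
  match pvBuildAll (card.map Prod.snd) card.length with
  | none => none   -- IndexError on a short row: excluded by Pre_
  | some avs => pvScanA avs

-- ===== PORT B =====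
-- col_sums = [col_sums[i] + row[i] for i in range(n)]
-- (col_sums always has length n, so col_sums[i] never raises: pyGetD; row[i] may raise → Option)
def pvAddRow (s row : List Int) (n : Nat) : Option (List Int) :=
  (PySem.List.pyRange 0 n 1).foldl
    (fun acc i => acc.bind (fun l =>
      (PySem.List.pyGet? row i).map (fun x => l ++ [PySem.List.pyGetD s i 0 + x])))
    (some [])

-- for s in col_sums: if s == 0: return True   (falls off the end → None)
def pvScanB : List Int → Option Bool
  | [] => none
  | s :: rest => if s = 0 then some true else pvScanB rest

def checkVertically_alt (card : List (String × List Int)) : Option Bool :=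
  match (card.map Prod.snd).foldl (fun acc row => acc.bind (fun t => pvAddRow t row card.length)) (some (List.replicate card.length 0)) with
  | none => none   -- IndexError on a short row: excluded by Pre_
  | some sums => pvScanB sums

-- ===== PRECONDITION & SPEC =====
-- Pre_ excludes exactly the cards with a value list shorter than the number of keys,
-- on which the Python A raises IndexError (val[i] for i in range(len(card))).
def Pre_checkVertically (card : List (String × List Int)) : Prop :=
  ∀ p ∈ card, card.length ≤ p.2.length
instance (card : List (String × List Int)) : Decidable (Pre_checkVertically card) := by unfold Pre_checkVertically; infer_instance

def pvWitness_checkVertically : (List (String × List Int)) := [("a", [1, -1]), ("b", [2, 3])]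

def Spec_checkVertically (card : List (String × List Int)) (out : Option Bool) : Prop := out = checkVertically_alt card
instance (card : List (String × List Int)) (out : Option Bool) : Decidable (Spec_checkVertically card out) := by unfold Spec_checkVertically; infer_instance

-- ===== CLAIM (what is proved, stated in full; the proofs are below) =====
def Claim_equal_checkVertically : Prop := ∀ (card : List (String × List Int)), Dom_checkVertically card → Pre_checkVertically card → Spec_checkVertically card (checkVertically card)

-- ===== LEMMAS AND PROOFS =====

-- A's inner loop, with the accumulator generalized.
theorem pvBuildCol_aux (i : Nat) (n : Nat) (hi : i < n) :
    ∀ (vals : List (List Int)) (l0 : List Int), (∀ r ∈ vals, n ≤ r.length) →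
    vals.foldl (fun acc val => acc.bind (fun l => (PySem.List.pyGet? val (i : Int)).map (fun x => l ++ [x]))) (some l0)
      = some (l0 ++ vals.map (fun r => r.getD i 0)) := by
  intro vals
  induction vals with
  | nil => intro l0 _; simp
  | cons r rest ih =>
    intro l0 h
    have hr : i < r.length := lt_of_lt_of_le hi (h r (by simp))
    simp only [List.foldl_cons, Option.bind_some]
    rw [PySem.List.pyGet?_natCast, List.getElem?_eq_getElem hr]
    simp only [Option.map_some]
    rw [ih (l0 ++ [r[i]]) (fun q hq => h q (by simp [hq]))]
    simp [List.getD_eq_getElem?_getD, List.getElem?_eq_getElem hr]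

-- A's inner loop builds the i-th column, provided every row is long enough.
theorem pvBuildCol_eq (vals : List (List Int)) (n i : Nat)
    (h : ∀ r ∈ vals, n ≤ r.length) (hi : i < n) :
    pvBuildCol vals i = some (vals.map (fun r => r.getD i 0)) := by
  unfold pvBuildCol
  rw [pvBuildCol_aux i n hi vals [] h]
  simp

-- A's outer loop builds the list of all n columns.
theorem pvBuildAll_eq (vals : List (List Int)) (n : Nat)
    (h : ∀ r ∈ vals, n ≤ r.length) :
    pvBuildAll vals n = some ((List.range n).map (fun i => vals.map (fun r => r.getD i 0))) := by
  unfold pvBuildAll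
  induction n with
  | zero => simp [PySem.List.pyRange_one_eq_nil]
  | succ m ih =>
    have hm : ∀ r ∈ vals, m ≤ r.length := fun r hr => le_trans (Nat.le_succ m) (h r hr)
    have hcast : ((m + 1 : Nat) : Int) = (m : Int) + 1 := by push_cast; ring
    rw [hcast, PySem.List.pyRange_one_succ_right (by positivity), List.foldl_append]
    rw [ih hm]
    simp only [List.foldl_cons, List.foldl_nil, Option.bind_some]
    rw [pvBuildCol_eq vals (m+1) m h (Nat.lt_succ_self m)]
    simp [List.range_succ]

-- B's comprehension adds one row to the running column sums.
theorem pvAddRow_eq (s row : List Int) (n : Nat) (h : n ≤ row.length) :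
    pvAddRow s row n = some ((List.range n).map (fun i => s.getD i 0 + row.getD i 0)) := by
  unfold pvAddRow
  induction n with
  | zero => simp [PySem.List.pyRange_one_eq_nil]
  | succ m ih =>
    have hm : m ≤ row.length := le_trans (Nat.le_succ m) h
    have hr : m < row.length := lt_of_lt_of_le (Nat.lt_succ_self m) h
    have hcast : ((m + 1 : Nat) : Int) = (m : Int) + 1 := by push_cast; ring
    rw [hcast, PySem.List.pyRange_one_succ_right (by positivity), List.foldl_append]
    rw [ih hm]
    simp only [List.foldl_cons, List.foldl_nil, Option.bind_some]
    rw [PySem.List.pyGet?_natCast, List.getElem?_eq_getElem hr, PySem.List.pyGetD_natCast]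
    simp [List.range_succ, List.getD_eq_getElem?_getD, List.getElem?_eq_getElem hr]

-- B's row loop: the accumulator holds the column sums of the rows processed so far.
theorem pvFoldRows_eq (n : Nat) (vals : List (List Int)) :
    ∀ (s : List Int), (∀ r ∈ vals, n ≤ r.length) → s.length = n →
    vals.foldl (fun acc row => acc.bind (fun t => pvAddRow t row n)) (some s)
      = some ((List.range n).map (fun i => s.getD i 0 + (vals.map (fun r => r.getD i 0)).sum)) := by
  induction vals with
  | nil =>
    intro s _ hs
    simp only [List.foldl_nil, List.map_nil, List.sum_nil, Int.add_zero]
    congr 1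
    apply List.ext_getElem
    · simp [hs]
    · intro i h1 h2
      simp [List.getD_eq_getElem?_getD, List.getElem?_eq_getElem h1]
  | cons r rest ih =>
    intro s h hs
    simp only [List.foldl_cons, Option.bind_some]
    rw [pvAddRow_eq s r n (h r (by simp))]
    rw [ih _ (fun q hq => h q (by simp [hq])) (by simp)]
    congr 1
    apply List.map_congr_left
    intro i hi
    have hin : i < n := List.mem_range.mp hi
    rw [PySem.List.getD_map_range _ _ _ _ hin]
    simp [List.sum_cons]
    ring

-- A's early-return scan returns some true iff some column sums to zero.
theorem pvScanA_eq (l : List (List Int)) :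
    pvScanA l = if ∃ c ∈ l, c.sum = 0 then some true else none := by
  induction l with
  | nil => simp [pvScanA]
  | cons c rest ih =>
    simp only [pvScanA, ih]
    by_cases h : c.sum = 0 <;> simp [h]

-- B's early-return scan returns some true iff some accumulated sum is zero.
theorem pvScanB_eq (l : List Int) :
    pvScanB l = if ∃ s ∈ l, s = 0 then some true else none := by
  induction l with
  | nil => simp [pvScanB]
  | cons c rest ih =>
    simp only [pvScanB, ih]
    by_cases h : c = 0 <;> simp [h, eq_comm]

-- ===== VERDICT (by name: the statement is the Claim_ definition above) =====
theorem checkVertically_spec : Claim_equal_checkVertically := by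
  intro card _ hpre
  unfold Spec_checkVertically
  have hvals : ∀ r ∈ card.map Prod.snd, card.length ≤ r.length := by
    intro r hr
    rcases List.mem_map.mp hr with ⟨p, hp, rfl⟩
    exact hpre p hp
  unfold checkVertically checkVertically_alt
  rw [pvBuildAll_eq _ _ hvals, pvFoldRows_eq _ _ _ hvals (by simp)]
  simp only [pvScanA_eq, pvScanB_eq]
  have hiff : (∃ c ∈ (List.range card.length).map (fun i => (card.map Prod.snd).map (fun r => r.getD i 0)), c.sum = 0)
      ↔ (∃ s ∈ (List.range card.length).map (fun i => (List.replicate card.length (0:Int)).getD i 0 + ((card.map Prod.snd).map (fun r => r.getD i 0)).sum), s = 0) := by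
    simp [List.mem_map, List.mem_range]
  rw [if_congr hiff rfl rfl]
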